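-- pv_equiv track=rewrite | github.com/fortenatalie/sbhacks-2025 | get_menu.py | adjust_menu_vegetarian
-- ===== SOURCE A (Python) =====
-- def adjust_menu_vegetarian(meals_map): # "(v)" "(vgn)"
--     veg_map = {}
--     for location, meals in meals_map.items():
--         for meal, stations in meals.items():
--             for station, foods in stations.items():
--                 for food in foods:
--                     if "(v)" in food or "(vgn)" in food:
--                         if location not in veg_map:
--                             veg_map[location] = {}
--                         if meal not in veg_map[location]:
--                             veg_map[location][meal] = {}
--                         if station not in veg_map[location][meal]:
--                             veg_map[location][meal][station] = []
--                         veg_map[location][meal][station].append(food)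
--     return veg_map
-- ===== SOURCE B (Python) =====
-- def adjust_menu_vegetarian(meals_map):
--     # Flatten-then-regroup: stage 1 flattens the nested menu into a flat stream of
--     # vegetarian (location, (meal, (station, food))) records; stage 2 rebuilds the
--     # nesting by grouping consecutive runs of equal keys level by level.
--     def is_veg(food):
--         return "(v)" in food or "(vgn)" in food
--
--     flat = [(loc, (meal, (st, food)))
--             for loc, meals in meals_map.items()
--             for meal, stations in meals.items()
--             for st, foods in stations.items()
--             for food in foods if is_veg(food)]
--
--     def group_runs(rows):
--         out = []
--         i = 0
--         while i < len(rows):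
--             key = rows[i][0]
--             j = i + 1
--             while j < len(rows) and rows[j][0] == key:
--                 j += 1
--             out.append((key, [v for _, v in rows[i:j]]))
--             i = j
--         return out
--
--     return {loc: {meal: {st: foods for st, foods in group_runs(strows)}
--                   for meal, strows in group_runs(mrows)}
--             for loc, mrows in group_runs(flat)}
-- ===== Notes on version B (the rewrite author's own statement) =====
-- stated objective: alternative
-- what changed: B flattens the nested menu into a flat list of vegetarian (location,(meal,(station,food))) records in one comprehension and then rebuilds the nesting by grouping consecutive runs of equal keys level by level, instead of A's per-food lazy creation and mutation of nested parent dicts; Pre_ only excludes Lean-level association lists with duplicate keys at some dict level, which represent no Python dict and so correspond to no input of A.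
import Mathlib
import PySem

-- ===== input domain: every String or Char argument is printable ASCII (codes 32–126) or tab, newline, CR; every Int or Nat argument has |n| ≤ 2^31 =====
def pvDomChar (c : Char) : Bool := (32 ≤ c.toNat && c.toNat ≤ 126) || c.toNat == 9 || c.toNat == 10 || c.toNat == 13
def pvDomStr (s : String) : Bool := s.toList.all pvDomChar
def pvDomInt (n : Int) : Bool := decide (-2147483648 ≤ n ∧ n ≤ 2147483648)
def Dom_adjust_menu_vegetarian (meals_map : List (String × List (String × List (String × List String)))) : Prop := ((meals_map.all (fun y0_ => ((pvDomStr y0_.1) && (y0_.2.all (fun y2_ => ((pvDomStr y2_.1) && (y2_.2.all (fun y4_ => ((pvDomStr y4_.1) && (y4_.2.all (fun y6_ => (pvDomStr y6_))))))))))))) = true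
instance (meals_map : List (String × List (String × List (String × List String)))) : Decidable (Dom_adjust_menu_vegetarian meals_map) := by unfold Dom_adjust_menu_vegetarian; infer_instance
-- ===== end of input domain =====

-- B flattens the nested menu into a flat list of vegetarian records and regroups it by
-- consecutive equal-key runs, instead of A's per-food lazy creation of nested parent dicts;
-- objective: alternative. Return-value equivalence only; neither version mutates its argument.

-- ===== PORT A =====
abbrev PvD1 : Type := PySem.Dict String (List String)
abbrev PvD2 : Type := PySem.Dict String PvD1
abbrev PvD3 : Type := PySem.Dict String PvD2

def pvIsVeg (food : String) : Bool := PySem.Str.isIn "(v)" food || PySem.Str.isIn "(vgn)" food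

-- one matching food: the four `if … not in …` creations followed by the append, each level
-- re-read from the current dict and written back (Python's in-place mutation = insert overwrite)
def pvStepFood (d : PvD3) (l m s food : String) : PvD3 :=
  let d1 := if d.contains l then d else d.insert l PySem.Dict.empty
  let d2 := if (d1.getD l PySem.Dict.empty).contains m then d1 else
    d1.insert l ((d1.getD l PySem.Dict.empty).insert m PySem.Dict.empty)
  let d3 := if ((d2.getD l PySem.Dict.empty).getD m PySem.Dict.empty).contains s then d2 else
    d2.insert l ((d2.getD l PySem.Dict.empty).insert m
      (((d2.getD l PySem.Dict.empty).getD m PySem.Dict.empty).insert s []))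
  d3.insert l ((d3.getD l PySem.Dict.empty).insert m
    (((d3.getD l PySem.Dict.empty).getD m PySem.Dict.empty).insert s
      ((((d3.getD l PySem.Dict.empty).getD m PySem.Dict.empty).getD s []) ++ [food])))

def pvFoldFoods (d : PvD3) (l m s : String) (foods : List String) : PvD3 :=
  foods.foldl (fun d food => if pvIsVeg food then pvStepFood d l m s food else d) d

def pvFoldStations (d : PvD3) (l m : String) (stations : List (String × List String)) : PvD3 :=
  stations.foldl (fun d sp => pvFoldFoods d l m sp.1 sp.2) d

def pvFoldMeals (d : PvD3) (l : String) (meals : List (String × List (String × List String))) : PvD3 :=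
  meals.foldl (fun d mp => pvFoldStations d l mp.1 mp.2) d

def pvFoldLocs (d : PvD3) (mm : List (String × List (String × List (String × List String)))) : PvD3 :=
  mm.foldl (fun d lp => pvFoldMeals d lp.1 lp.2) d

def adjust_menu_vegetarian (meals_map : List (String × List (String × List (String × List String)))) : List (String × List (String × List (String × List String))) :=
  (pvFoldLocs PySem.Dict.empty meals_map).items.map
    (fun p => (p.1, p.2.items.map (fun q => (q.1, q.2.items))))

-- ===== PORT B =====
-- stage 1 of Source B: the flat comprehension of vegetarian (loc, (meal, (station, food))) records
def pvFlat (mm : List (String × List (String × List (String × List String)))) : List (String × (String × (String × String))) :=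
  mm.flatMap (fun lp => lp.2.flatMap (fun mp => mp.2.flatMap (fun sp =>
    (sp.2.filter pvIsVeg).map (fun f => (lp.1, (mp.1, (sp.1, f)))))))

-- stage 2 of Source B, group_runs: the outer while loop emits one group per run; the inner
-- index scan `while j < len(rows) and rows[j][0] == key` computes exactly takeWhile of the
-- tail, and continuing at i = j is the recursion on the dropWhile suffix (exact)
def pvGroupRunsF {β : Type} : Nat → List (String × β) → List (String × List β)
  | 0, _ => []
  | _ + 1, [] => []
  | fuel + 1, (k, v) :: rest =>
      (k, v :: (rest.takeWhile (fun p => p.1 == k)).map Prod.snd) ::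
        pvGroupRunsF fuel (rest.dropWhile (fun p => p.1 == k))

def pvGroupRuns {β : Type} (rows : List (String × β)) : List (String × List β) :=
  pvGroupRunsF rows.length rows

-- a dict comprehension `{k: v for k, v in pairs}` (exact: insert-overwrite in order)
def pvDictOf {β : Type} (l : List (String × β)) : List (String × β) :=
  ((l.foldl (fun d p => d.insert p.1 p.2) (PySem.Dict.empty : PySem.Dict String β))).items

def adjust_menu_vegetarian_alt (meals_map : List (String × List (String × List (String × List String)))) : List (String × List (String × List (String × List String))) :=
  pvDictOf ((pvGroupRuns (pvFlat meals_map)).map (fun lp => (lp.1,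
    pvDictOf ((pvGroupRuns lp.2).map (fun mp => (mp.1,
      pvDictOf (pvGroupRuns mp.2)))))))

-- ===== PRECONDITION & SPEC =====
-- Pre_ excludes association lists with duplicate keys at some dict level: such lists do not
-- represent any Python dict (A's argument type), and A's port merges duplicates while B's
-- grouping keeps non-adjacent duplicates separate, so neither behaviour is Python's.
def Pre_adjust_menu_vegetarian (meals_map : List (String × List (String × List (String × List String)))) : Prop :=
  (meals_map.map Prod.fst).Nodup ∧
    ∀ p ∈ meals_map, (p.2.map Prod.fst).Nodup ∧ ∀ q ∈ p.2, (q.2.map Prod.fst).Nodup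
instance (meals_map : List (String × List (String × List (String × List String)))) : Decidable (Pre_adjust_menu_vegetarian meals_map) := by unfold Pre_adjust_menu_vegetarian; infer_instance

def pvWitness_adjust_menu_vegetarian : (List (String × List (String × List (String × List String)))) :=
  [("Portola", [("lunch", [("grill", ["tofu (v)", "burger"]), ("salad", ["kale (vgn)"])]),
                ("dinner", [("grill", ["steak"])])])]

def Spec_adjust_menu_vegetarian (meals_map : List (String × List (String × List (String × List String)))) (out : List (String × List (String × List (String × List String)))) : Prop := out = adjust_menu_vegetarian_alt meals_map
instance (meals_map : List (String × List (String × List (String × List String)))) (out : List (String × List (String × List (String × List String)))) : Decidable (Spec_adjust_menu_vegetarian meals_map out) := by unfold Spec_adjust_menu_vegetarian; infer_instance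

-- ===== CLAIM (what is proved, stated in full; the proofs are below) =====
def Claim_equal_adjust_menu_vegetarian : Prop := ∀ (meals_map : List (String × List (String × List (String × List String)))), Dom_adjust_menu_vegetarian meals_map → Pre_adjust_menu_vegetarian meals_map → Spec_adjust_menu_vegetarian meals_map (adjust_menu_vegetarian meals_map)

-- ===== LEMMAS AND PROOFS =====

-- the common normal form both ports are reduced to: filter each station's foods, then prune
-- empty stations/meals/locations (proof-only helpers)
def pvKeep {β : Type} (d : List (String × List β)) : List (String × List β) :=
  d.filter (fun p => !p.2.isEmpty)

def pvFSt (stations : List (String × List String)) : List (String × List String) :=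
  pvKeep (stations.map (fun sp => (sp.1, sp.2.filter pvIsVeg)))

def pvFMeals (meals : List (String × List (String × List String))) : List (String × PvD1) :=
  (meals.map (fun mp => (mp.1, PySem.Dict.mk (pvFSt mp.2)))).filter (fun p => !p.2.items.isEmpty)

def pvFLocs (mm : List (String × List (String × List (String × List String)))) : List (String × PvD2) :=
  (mm.map (fun lp => (lp.1, PySem.Dict.mk (pvFMeals lp.2)))).filter (fun p => !p.2.items.isEmpty)

-- ---- A-side reduction ----

theorem pvStepFood_eq (d : PvD3) (l m s food : String) :
    pvStepFood d l m s food =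
      d.insert l ((d.getD l PySem.Dict.empty).insert m
        (((d.getD l PySem.Dict.empty).getD m PySem.Dict.empty).insert s
          ((((d.getD l PySem.Dict.empty).getD m PySem.Dict.empty).getD s []) ++ [food]))) := by
  unfold pvStepFood
  cases h1 : d.contains l with
  | false =>
      simp [PySem.Dict.getD_insert_self, PySem.Dict.insert_insert_self,
        PySem.Dict.contains_empty, PySem.Dict.getD_empty,
        PySem.Dict.getD_of_not_contains _ _ h1]
  | true =>
      cases h2 : (d.getD l PySem.Dict.empty).contains m with
      | false =>
          simp [h2, PySem.Dict.getD_insert_self, PySem.Dict.insert_insert_self,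
            PySem.Dict.contains_empty, PySem.Dict.getD_empty,
            PySem.Dict.getD_of_not_contains _ _ h2]
      | true =>
          cases h3 : ((d.getD l PySem.Dict.empty).getD m PySem.Dict.empty).contains s with
          | false =>
              simp [h2, h3, PySem.Dict.getD_insert_self, PySem.Dict.insert_insert_self,
                PySem.Dict.getD_of_not_contains _ _ h3]
          | true =>
              simp [h2, h3]

theorem pvFoldFoods_eq (foods : List String) (d : PvD3) (l m s : String) :
    pvFoldFoods d l m s foods =
      if foods.filter pvIsVeg = [] then d
      else d.insert l ((d.getD l PySem.Dict.empty).insert m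
        (((d.getD l PySem.Dict.empty).getD m PySem.Dict.empty).insert s
          ((((d.getD l PySem.Dict.empty).getD m PySem.Dict.empty).getD s [])
            ++ foods.filter pvIsVeg))) := by
  induction foods generalizing d with
  | nil => simp [pvFoldFoods]
  | cons f foods ih =>
      cases hveg : pvIsVeg f with
      | false =>
          have : pvFoldFoods d l m s (f :: foods) = pvFoldFoods d l m s foods := by
            simp [pvFoldFoods, hveg]
          rw [this, ih, List.filter_cons_of_neg (by simp [hveg])]
      | true =>
          have hstep : pvFoldFoods d l m s (f :: foods)
              = pvFoldFoods (pvStepFood d l m s f) l m s foods := by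
            simp [pvFoldFoods, hveg]
          rw [hstep, ih, pvStepFood_eq, List.filter_cons_of_pos (by simp [hveg])]
          simp only [PySem.Dict.getD_insert_self, PySem.Dict.insert_insert_self]
          cases hrest : foods.filter pvIsVeg with
          | nil => simp
          | cons g gs => simp

theorem pvFoldStations_eq (stations : List (String × List String)) (d : PvD3) (l m : String)
    (hnd : (stations.map Prod.fst).Nodup)
    (hfresh : ∀ sp ∈ stations, ((d.getD l PySem.Dict.empty).getD m PySem.Dict.empty).contains sp.1 = false) :
    pvFoldStations d l m stations =
      if pvFSt stations = [] then d
      else d.insert l ((d.getD l PySem.Dict.empty).insert m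
        (PySem.Dict.mk (((d.getD l PySem.Dict.empty).getD m PySem.Dict.empty).items ++ pvFSt stations))) := by
  induction stations generalizing d with
  | nil =>
      simp only [pvFoldStations, List.foldl_nil, pvFSt, pvKeep, List.map_nil, List.filter_nil,
        if_true]
  | cons sp rest ih =>
      have hstep : pvFoldStations d l m (sp :: rest)
          = pvFoldStations (pvFoldFoods d l m sp.1 sp.2) l m rest := by
        simp [pvFoldStations]
      have hs : ((d.getD l PySem.Dict.empty).getD m PySem.Dict.empty).contains sp.1 = false :=
        hfresh sp (by simp)
      have hnd1 : sp.1 ∉ rest.map Prod.fst ∧ (rest.map Prod.fst).Nodup := by simpa using hnd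
      rw [hstep, pvFoldFoods_eq]
      by_cases hF : sp.2.filter pvIsVeg = []
      · have hkeep : pvFSt (sp :: rest) = pvFSt rest := by
          simp [pvFSt, pvKeep, hF]
        rw [if_pos hF, hkeep, ih d hnd1.2 (fun q hq => hfresh q (by simp [hq]))]
      · rw [if_neg hF]
        have hcur : ((d.getD l PySem.Dict.empty).getD m PySem.Dict.empty).getD sp.1 [] = [] :=
          PySem.Dict.getD_of_not_contains _ _ hs
        rw [hcur]
        have hread1 : (d.insert l ((d.getD l PySem.Dict.empty).insert m
              (((d.getD l PySem.Dict.empty).getD m PySem.Dict.empty).insert sp.1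
                ([] ++ sp.2.filter pvIsVeg)))).getD l PySem.Dict.empty
            = (d.getD l PySem.Dict.empty).insert m
              (((d.getD l PySem.Dict.empty).getD m PySem.Dict.empty).insert sp.1
                ([] ++ sp.2.filter pvIsVeg)) :=
          PySem.Dict.getD_insert_self _ _ _ _
        have hfresh' : ∀ q ∈ rest,
            (((d.insert l ((d.getD l PySem.Dict.empty).insert m
                (((d.getD l PySem.Dict.empty).getD m PySem.Dict.empty).insert sp.1
                  ([] ++ sp.2.filter pvIsVeg)))).getD l PySem.Dict.empty).getD m
                    PySem.Dict.empty).contains q.1 = false := by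
          intro q hq
          rw [hread1, PySem.Dict.getD_insert_self, PySem.Dict.contains_insert]
          have hne : q.1 ≠ sp.1 := fun h => hnd1.1 (h ▸ List.mem_map_of_mem hq)
          simp [hne, hfresh q (by simp [hq])]
        rw [ih _ hnd1.2 hfresh']
        have hitems : ((((d.getD l PySem.Dict.empty).getD m PySem.Dict.empty)).insert sp.1
              ([] ++ sp.2.filter pvIsVeg)).items
            = ((d.getD l PySem.Dict.empty).getD m PySem.Dict.empty).items
              ++ [(sp.1, sp.2.filter pvIsVeg)] := by
          rw [PySem.Dict.items_insert_of_not_contains _ _ hs]; simp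
        have hFE : (sp.2.filter pvIsVeg).isEmpty = false := by
          rw [Bool.eq_false_iff]; exact fun h => hF (List.isEmpty_iff.mp h)
        have hkeep : pvFSt (sp :: rest) = (sp.1, sp.2.filter pvIsVeg) :: pvFSt rest := by
          simp [pvFSt, pvKeep, hFE]
        rw [hkeep]
        by_cases hrest : pvFSt rest = []
        · rw [hrest, if_pos rfl, if_neg (by simp)]
          refine congrArg (d.insert l) (congrArg _ (PySem.Dict.ext ?_))
          rw [hitems]
        · rw [if_neg hrest, if_neg (by simp), hread1, PySem.Dict.getD_insert_self,
            PySem.Dict.insert_insert_self, PySem.Dict.insert_insert_self, hitems]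
          simp

theorem pvFoldMeals_eq (meals : List (String × List (String × List String))) (d : PvD3) (l : String)
    (hnd : (meals.map Prod.fst).Nodup)
    (hin : ∀ mp ∈ meals, (mp.2.map Prod.fst).Nodup)
    (hfresh : ∀ mp ∈ meals, (d.getD l PySem.Dict.empty).contains mp.1 = false) :
    pvFoldMeals d l meals =
      if pvFMeals meals = [] then d
      else d.insert l (PySem.Dict.mk ((d.getD l PySem.Dict.empty).items ++ pvFMeals meals)) := by
  induction meals generalizing d with
  | nil => simp [pvFoldMeals, pvFMeals]
  | cons mp rest ih =>
      have hstep : pvFoldMeals d l (mp :: rest)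
          = pvFoldMeals (pvFoldStations d l mp.1 mp.2) l rest := by
        simp [pvFoldMeals]
      have hm : (d.getD l PySem.Dict.empty).contains mp.1 = false := hfresh mp (by simp)
      have hnd1 : mp.1 ∉ rest.map Prod.fst ∧ (rest.map Prod.fst).Nodup := by simpa using hnd
      have hds : (d.getD l PySem.Dict.empty).getD mp.1 PySem.Dict.empty = PySem.Dict.empty :=
        PySem.Dict.getD_of_not_contains _ _ hm
      rw [hstep, pvFoldStations_eq mp.2 d l mp.1 (hin mp (by simp))
        (fun sp _ => by rw [hds]; exact PySem.Dict.contains_empty _)]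
      by_cases hF : pvFSt mp.2 = []
      · have hrw : pvFMeals (mp :: rest) = pvFMeals rest := by
          simp [pvFMeals, hF]
        rw [if_pos hF, hrw]
        exact ih d hnd1.2 (fun q hq => hin q (by simp [hq])) (fun q hq => hfresh q (by simp [hq]))
      · rw [if_neg hF, hds]
        have hEmp : (PySem.Dict.empty : PvD1).items = [] := rfl
        rw [hEmp, List.nil_append]
        have hread1 : (d.insert l ((d.getD l PySem.Dict.empty).insert mp.1
              (PySem.Dict.mk (pvFSt mp.2)))).getD l PySem.Dict.empty
            = (d.getD l PySem.Dict.empty).insert mp.1 (PySem.Dict.mk (pvFSt mp.2)) :=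
          PySem.Dict.getD_insert_self _ _ _ _
        have hfresh' : ∀ q ∈ rest,
            ((d.insert l ((d.getD l PySem.Dict.empty).insert mp.1
              (PySem.Dict.mk (pvFSt mp.2)))).getD l PySem.Dict.empty).contains q.1 = false := by
          intro q hq
          rw [hread1, PySem.Dict.contains_insert]
          have hne : q.1 ≠ mp.1 := fun h => hnd1.1 (h ▸ List.mem_map_of_mem hq)
          simp [hne, hfresh q (by simp [hq])]
        rw [ih _ hnd1.2 (fun q hq => hin q (by simp [hq])) hfresh']
        have hitems : ((d.getD l PySem.Dict.empty).insert mp.1 (PySem.Dict.mk (pvFSt mp.2))).items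
            = (d.getD l PySem.Dict.empty).items ++ [(mp.1, PySem.Dict.mk (pvFSt mp.2))] :=
          PySem.Dict.items_insert_of_not_contains _ _ hm
        have hFE : (pvFSt mp.2).isEmpty = false := by
          rw [Bool.eq_false_iff]; exact fun h => hF (List.isEmpty_iff.mp h)
        have hrw : pvFMeals (mp :: rest) = (mp.1, PySem.Dict.mk (pvFSt mp.2)) :: pvFMeals rest := by
          simp [pvFMeals, hFE]
        rw [hrw]
        by_cases hrest : pvFMeals rest = []
        · rw [hrest, if_pos rfl, if_neg (by simp)]
          refine congrArg (d.insert l) (PySem.Dict.ext ?_)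
          rw [hitems]
        · rw [if_neg hrest, if_neg (by simp), hread1, PySem.Dict.insert_insert_self, hitems]
          simp

theorem pvFoldLocs_eq (mm : List (String × List (String × List (String × List String)))) (d : PvD3)
    (hnd : (mm.map Prod.fst).Nodup)
    (hin : ∀ p ∈ mm, (p.2.map Prod.fst).Nodup ∧ ∀ q ∈ p.2, (q.2.map Prod.fst).Nodup)
    (hfresh : ∀ lp ∈ mm, d.contains lp.1 = false) :
    pvFoldLocs d mm = PySem.Dict.mk (d.items ++ pvFLocs mm) := by
  induction mm generalizing d with
  | nil =>
      simp only [pvFoldLocs, List.foldl_nil, pvFLocs, List.map_nil, List.filter_nil,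
        List.append_nil]
  | cons lp rest ih =>
      have hstep : pvFoldLocs d (lp :: rest) = pvFoldLocs (pvFoldMeals d lp.1 lp.2) rest := by
        simp [pvFoldLocs]
      have hl : d.contains lp.1 = false := hfresh lp (by simp)
      have hnd1 : lp.1 ∉ rest.map Prod.fst ∧ (rest.map Prod.fst).Nodup := by simpa using hnd
      have hdm : d.getD lp.1 PySem.Dict.empty = PySem.Dict.empty :=
        PySem.Dict.getD_of_not_contains _ _ hl
      rw [hstep, pvFoldMeals_eq lp.2 d lp.1 (hin lp (by simp)).1 (hin lp (by simp)).2
        (fun mp _ => by rw [hdm]; exact PySem.Dict.contains_empty _)]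
      by_cases hF : pvFMeals lp.2 = []
      · have hrw : pvFLocs (lp :: rest) = pvFLocs rest := by
          simp [pvFLocs, hF]
        rw [if_pos hF, hrw]
        exact ih d hnd1.2 (fun q hq => hin q (by simp [hq])) (fun q hq => hfresh q (by simp [hq]))
      · rw [if_neg hF, hdm]
        have hEmp : (PySem.Dict.empty : PvD2).items = [] := rfl
        rw [hEmp, List.nil_append]
        have hfresh' : ∀ q ∈ rest,
            (d.insert lp.1 (PySem.Dict.mk (pvFMeals lp.2))).contains q.1 = false := by
          intro q hq
          rw [PySem.Dict.contains_insert]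
          have hne : q.1 ≠ lp.1 := fun h => hnd1.1 (h ▸ List.mem_map_of_mem hq)
          simp [hne, hfresh q (by simp [hq])]
        rw [ih _ hnd1.2 (fun q hq => hin q (by simp [hq])) hfresh']
        have hitems : (d.insert lp.1 (PySem.Dict.mk (pvFMeals lp.2))).items
            = d.items ++ [(lp.1, PySem.Dict.mk (pvFMeals lp.2))] :=
          PySem.Dict.items_insert_of_not_contains _ _ hl
        have hFE : (pvFMeals lp.2).isEmpty = false := by
          rw [Bool.eq_false_iff]; exact fun h => hF (List.isEmpty_iff.mp h)
        have hrw : pvFLocs (lp :: rest) = (lp.1, PySem.Dict.mk (pvFMeals lp.2)) :: pvFLocs rest := by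
          simp [pvFLocs, hFE]
        rw [hrw, hitems]
        simp

theorem pvMeals_conv (meals : List (String × List (String × List String))) :
    (pvFMeals meals).map (fun q => (q.1, q.2.items)) =
      pvKeep (meals.map (fun mp => (mp.1, pvFSt mp.2))) := by
  unfold pvFMeals pvKeep
  rw [List.filter_map, List.filter_map, List.map_map]
  rfl

theorem pvKeep_cons {β : Type} (x : String × List β) (l : List (String × List β)) :
    pvKeep (x :: l) = if x.2.isEmpty then pvKeep l else x :: pvKeep l := by
  simp only [pvKeep, List.filter_cons]
  cases h : x.2.isEmpty <;> simp

theorem pvFLocs_cons (lp : String × List (String × List (String × List String)))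
    (rest : List (String × List (String × List (String × List String)))) :
    pvFLocs (lp :: rest) =
      if (pvFMeals lp.2).isEmpty then pvFLocs rest
      else (lp.1, PySem.Dict.mk (pvFMeals lp.2)) :: pvFLocs rest := by
  simp only [pvFLocs, List.map_cons, List.filter_cons]
  cases h : (pvFMeals lp.2).isEmpty <;> simp

theorem pvLocs_conv (mm : List (String × List (String × List (String × List String)))) :
    (pvFLocs mm).map (fun p => (p.1, p.2.items.map (fun q => (q.1, q.2.items)))) =
      pvKeep (mm.map (fun lp => (lp.1, pvKeep (lp.2.map (fun mp => (mp.1, pvFSt mp.2)))))) := by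
  induction mm with
  | nil => rfl
  | cons lp rest ih =>
      rw [pvFLocs_cons, List.map_cons, pvKeep_cons]
      have hEmpty : (pvKeep (lp.2.map (fun mp => (mp.1, pvFSt mp.2)))).isEmpty
          = (pvFMeals lp.2).isEmpty := by
        rw [← pvMeals_conv lp.2, List.isEmpty_map]
      rw [hEmpty]
      by_cases h : (pvFMeals lp.2).isEmpty
      · rw [if_pos h, if_pos h]
        exact ih
      · rw [if_neg h, if_neg h, List.map_cons]
        exact congrArg₂ (· :: ·) (congrArg (fun z => (lp.1, z)) (pvMeals_conv lp.2)) ih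

-- ---- B-side reduction ----

def pvFlatten1 {β : Type} (xs : List (String × List β)) : List (String × β) :=
  xs.flatMap (fun p => p.2.map (fun b => (p.1, b)))

theorem pv_takeWhile_app {α : Type} (p : α → Bool) (a b : List α)
    (ha : ∀ x ∈ a, p x = true) (hb : ∀ x ∈ b, p x = false) : (a ++ b).takeWhile p = a := by
  induction a with
  | nil =>
      cases b with
      | nil => rfl
      | cons x xs => simp [hb x (by simp)]
  | cons x xs ih =>
      simp only [List.cons_append, List.takeWhile_cons, ha x (by simp), if_true]
      exact congrArg (x :: ·) (ih (fun y hy => ha y (by simp [hy])))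

theorem pv_dropWhile_app {α : Type} (p : α → Bool) (a b : List α)
    (ha : ∀ x ∈ a, p x = true) (hb : ∀ x ∈ b, p x = false) : (a ++ b).dropWhile p = b := by
  induction a with
  | nil =>
      cases b with
      | nil => rfl
      | cons x xs => simp [hb x (by simp)]
  | cons x xs ih =>
      simp only [List.cons_append, List.dropWhile_cons, ha x (by simp), if_true]
      exact ih (fun y hy => ha y (by simp [hy]))

theorem pvGroupRunsF_flatten1 {β : Type} (xs : List (String × List β)) (fuel : Nat)
    (hfuel : (pvFlatten1 xs).length ≤ fuel)
    (hnd : (xs.map Prod.fst).Nodup) : pvGroupRunsF fuel (pvFlatten1 xs) = pvKeep xs := by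
  induction xs generalizing fuel with
  | nil => cases fuel <;> simp [pvFlatten1, pvGroupRunsF, pvKeep]
  | cons x rest ih =>
      have hnd1 : x.1 ∉ rest.map Prod.fst ∧ (rest.map Prod.fst).Nodup := by simpa using hnd
      have hkeyrest : ∀ y ∈ pvFlatten1 rest, (y.1 == x.1) = false := by
        intro y hy
        have : y.1 ∈ rest.map Prod.fst := by
          rcases List.mem_flatMap.mp hy with ⟨p, hp, hy2⟩
          rcases List.mem_map.mp hy2 with ⟨b, _, rfl⟩
          exact List.mem_map_of_mem hp
        exact beq_false_of_ne (fun h => hnd1.1 (h ▸ this))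
      cases hv : x.2 with
      | nil =>
          have h1 : pvFlatten1 (x :: rest) = pvFlatten1 rest := by
            simp [pvFlatten1, hv]
          rw [h1, ih fuel (h1 ▸ hfuel) hnd1.2, pvKeep_cons, hv]
          simp
      | cons v vs' =>
          have h1 : pvFlatten1 (x :: rest)
              = (x.1, v) :: (vs'.map (fun b => (x.1, b)) ++ pvFlatten1 rest) := by
            simp [pvFlatten1, hv]
          rw [h1] at hfuel ⊢
          cases fuel with
          | zero => simp at hfuel
          | succ f =>
          rw [pvGroupRunsF]
          have hf' : (pvFlatten1 rest).length ≤ f := by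
            simp [List.length_append] at hfuel; omega
          have htw : ((vs'.map (fun b => (x.1, b)) ++ pvFlatten1 rest).takeWhile
              (fun p => p.1 == x.1)) = vs'.map (fun b => (x.1, b)) :=
            pv_takeWhile_app _ _ _ (by intro y hy; rcases List.mem_map.mp hy with ⟨b, _, rfl⟩; simp)
              hkeyrest
          have hdw : ((vs'.map (fun b => (x.1, b)) ++ pvFlatten1 rest).dropWhile
              (fun p => p.1 == x.1)) = pvFlatten1 rest :=
            pv_dropWhile_app _ _ _ (by intro y hy; rcases List.mem_map.mp hy with ⟨b, _, rfl⟩; simp)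
              hkeyrest
          rw [htw, hdw, ih f hf' hnd1.2, pvKeep_cons, hv]
          simp only [List.map_map, List.isEmpty_cons, if_neg Bool.false_ne_true]
          rw [show (List.map (Prod.snd ∘ fun b => (x.1, b)) vs') = vs' from by
            simp [Function.comp_def]]
          rw [← hv]

theorem pvGroupRuns_flatten1 {β : Type} (xs : List (String × List β))
    (hnd : (xs.map Prod.fst).Nodup) : pvGroupRuns (pvFlatten1 xs) = pvKeep xs :=
  pvGroupRunsF_flatten1 xs _ le_rfl hnd

theorem pvDictOf_foldl {β : Type} (l : List (String × β)) (d : PySem.Dict String β)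
    (hnd : (l.map Prod.fst).Nodup) (hf : ∀ p ∈ l, d.contains p.1 = false) :
    (l.foldl (fun d p => d.insert p.1 p.2) d).items = d.items ++ l := by
  induction l generalizing d with
  | nil => simp
  | cons p rest ih =>
      have hnd1 : p.1 ∉ rest.map Prod.fst ∧ (rest.map Prod.fst).Nodup := by simpa using hnd
      have hp : d.contains p.1 = false := hf p (by simp)
      have hf' : ∀ q ∈ rest, (d.insert p.1 p.2).contains q.1 = false := by
        intro q hq
        rw [PySem.Dict.contains_insert]
        have hne : q.1 ≠ p.1 := fun h => hnd1.1 (h ▸ List.mem_map_of_mem hq)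
        simp [hne, hf q (by simp [hq])]
      rw [List.foldl_cons, ih _ hnd1.2 hf',
        PySem.Dict.items_insert_of_not_contains _ _ hp]
      simp

theorem pvDictOf_nodup {β : Type} (l : List (String × β)) (hnd : (l.map Prod.fst).Nodup) :
    pvDictOf l = l := by
  unfold pvDictOf
  rw [pvDictOf_foldl l _ hnd (fun p _ => PySem.Dict.contains_empty _)]
  rfl

theorem pvKeep_keys_sublist {β : Type} (l : List (String × List β)) :
    ((pvKeep l).map Prod.fst).Sublist (l.map Prod.fst) :=
  List.filter_sublist.map Prod.fst

theorem pvFlatten1_isEmpty {β : Type} (ys : List (String × List β)) :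
    (pvFlatten1 ys).isEmpty = (pvKeep ys).isEmpty := by
  induction ys with
  | nil => rfl
  | cons y r ih =>
      rw [pvKeep_cons]
      have h1 : pvFlatten1 (y :: r) = y.2.map (fun b => (y.1, b)) ++ pvFlatten1 r := by
        simp [pvFlatten1]
      rw [h1]
      cases hse : y.2.isEmpty with
      | true =>
          have h0 : y.2 = [] := List.isEmpty_iff.mp hse
          simpa [h0] using ih
      | false =>
          have hne : y.2 ≠ [] := by intro h; rw [h] at hse; simp at hse
          rcases List.exists_cons_of_ne_nil hne with ⟨a, as, ha⟩
          simp [ha]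

theorem pvKeep_map_congr {α β γ : Type} (l : List α)
    (f : α → String × List β) (g : String × List β → String × List γ) (f' : α → String × List γ)
    (hemp : ∀ x ∈ l, (f x).2.isEmpty = (f' x).2.isEmpty)
    (hval : ∀ x ∈ l, g (f x) = f' x) :
    (pvKeep (l.map f)).map g = pvKeep (l.map f') := by
  induction l with
  | nil => rfl
  | cons a l ih =>
      rw [List.map_cons, List.map_cons, pvKeep_cons, pvKeep_cons, hemp a (by simp)]
      by_cases h : (f' a).2.isEmpty
      · rw [if_pos h, if_pos h]
        exact ih (fun x hx => hemp x (by simp [hx])) (fun x hx => hval x (by simp [hx]))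
      · rw [if_neg h, if_neg h, List.map_cons, hval a (by simp)]
        exact congrArg ((f' a) :: ·)
          (ih (fun x hx => hemp x (by simp [hx])) (fun x hx => hval x (by simp [hx])))

theorem pvKeep_isEmpty_congr {α β γ : Type} (l : List α)
    (f : α → String × List β) (f' : α → String × List γ)
    (h : ∀ x ∈ l, (f x).2.isEmpty = (f' x).2.isEmpty) :
    (pvKeep (l.map f)).isEmpty = (pvKeep (l.map f')).isEmpty := by
  induction l with
  | nil => rfl
  | cons a l ih =>
      rw [List.map_cons, List.map_cons, pvKeep_cons, pvKeep_cons, h a (by simp)]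
      by_cases he : (f' a).2.isEmpty
      · rw [if_pos he, if_pos he]
        exact ih (fun x hx => h x (by simp [hx]))
      · rw [if_neg he, if_neg he]
        simp

theorem pvFlat_eq (mm : List (String × List (String × List (String × List String)))) :
    pvFlat mm = pvFlatten1 (mm.map (fun lp => (lp.1,
      pvFlatten1 (lp.2.map (fun mp => (mp.1,
        pvFlatten1 (mp.2.map (fun sp => (sp.1, sp.2.filter pvIsVeg))))))))) := by
  simp [pvFlat, pvFlatten1, List.flatMap_map, List.map_flatMap, List.map_map,
    Function.comp_def]

theorem pvStation_level (st : List (String × List String)) (hnd : (st.map Prod.fst).Nodup) :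
    pvDictOf (pvGroupRuns (pvFlatten1 (st.map (fun sp => (sp.1, sp.2.filter pvIsVeg)))))
      = pvFSt st := by
  have hk : ((st.map (fun sp => (sp.1, sp.2.filter pvIsVeg))).map Prod.fst).Nodup := by
    simpa [List.map_map, Function.comp_def] using hnd
  rw [pvGroupRuns_flatten1 _ hk]
  exact pvDictOf_nodup _ ((pvKeep_keys_sublist _).nodup hk)

theorem pvStation_isEmpty (mp2 : List (String × List String)) :
    (pvFlatten1 (mp2.map (fun sp => (sp.1, sp.2.filter pvIsVeg)))).isEmpty
      = (pvFSt mp2).isEmpty :=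
  pvFlatten1_isEmpty _

theorem pvMeal_level (meals : List (String × List (String × List String)))
    (hnd : (meals.map Prod.fst).Nodup)
    (hin : ∀ mp ∈ meals, (mp.2.map Prod.fst).Nodup) :
    pvDictOf ((pvGroupRuns (pvFlatten1 (meals.map (fun mp => (mp.1,
        pvFlatten1 (mp.2.map (fun sp => (sp.1, sp.2.filter pvIsVeg)))))))).map
      (fun mp => (mp.1, pvDictOf (pvGroupRuns mp.2))))
      = pvKeep (meals.map (fun mp => (mp.1, pvFSt mp.2))) := by
  have hk : ((meals.map (fun mp => (mp.1,
      pvFlatten1 (mp.2.map (fun sp => (sp.1, sp.2.filter pvIsVeg)))))).map Prod.fst).Nodup := by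
    simpa [List.map_map, Function.comp_def] using hnd
  rw [pvGroupRuns_flatten1 _ hk]
  rw [pvKeep_map_congr meals _ _ (fun mp => (mp.1, pvFSt mp.2))
    (fun mp _ => pvStation_isEmpty mp.2)
    (fun mp hmp => congrArg (fun z => (mp.1, z)) (pvStation_level mp.2 (hin mp hmp)))]
  refine pvDictOf_nodup _ ((pvKeep_keys_sublist _).nodup ?_)
  simpa [List.map_map, Function.comp_def] using hnd

theorem pvMeal_isEmpty (lp2 : List (String × List (String × List String))) :
    (pvFlatten1 (lp2.map (fun mp => (mp.1,
        pvFlatten1 (mp.2.map (fun sp => (sp.1, sp.2.filter pvIsVeg))))))).isEmpty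
      = (pvKeep (lp2.map (fun mp => (mp.1, pvFSt mp.2)))).isEmpty := by
  rw [pvFlatten1_isEmpty]
  exact pvKeep_isEmpty_congr lp2 _ _ (fun mp _ => pvStation_isEmpty mp.2)

-- ===== VERDICT (by name: the statement is the Claim_ definition above) =====
theorem adjust_menu_vegetarian_spec : Claim_equal_adjust_menu_vegetarian := by
  intro mm _ hpre
  unfold Spec_adjust_menu_vegetarian adjust_menu_vegetarian adjust_menu_vegetarian_alt
  rw [pvFoldLocs_eq mm PySem.Dict.empty hpre.1 hpre.2
    (fun lp _ => PySem.Dict.contains_empty _)]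
  have h0 : (PySem.Dict.mk (((PySem.Dict.empty : PvD3)).items ++ pvFLocs mm)).items
      = pvFLocs mm := rfl
  rw [h0, pvLocs_conv, pvFlat_eq]
  have hk : ((mm.map (fun lp => (lp.1, pvFlatten1 (lp.2.map (fun mp => (mp.1,
      pvFlatten1 (mp.2.map (fun sp => (sp.1, sp.2.filter pvIsVeg))))))))).map Prod.fst).Nodup := by
    simpa [List.map_map, Function.comp_def] using hpre.1
  rw [pvGroupRuns_flatten1 _ hk]
  rw [pvKeep_map_congr mm _ _
    (fun lp => (lp.1, pvKeep (lp.2.map (fun mp => (mp.1, pvFSt mp.2)))))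
    (fun lp _ => pvMeal_isEmpty lp.2)
    (fun lp hlp => congrArg (fun z => (lp.1, z))
      (pvMeal_level lp.2 (hpre.2 lp hlp).1 (hpre.2 lp hlp).2))]
  rw [pvDictOf_nodup _ ((pvKeep_keys_sublist _).nodup
    (by simpa [List.map_map, Function.comp_def] using hpre.1))]
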